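-- pv_equiv track=rewrite | github.com/castocolina/learn-cloud | src/python/prompt_utils/yaml_utils.py | preprocess_text_for_yaml
-- ===== SOURCE A (Python) =====
-- DEFAULT_LINE_WIDTH = 80  # Default maximum column width for YAML text formatting
--
-- def preprocess_text_for_yaml(text: str, max_line_width: int = DEFAULT_LINE_WIDTH) -> str:
--     """
--     Preprocess text before saving to YAML to ensure proper formatting.
--
--     This function is critical for preventing unwanted blank lines in YAML folded style output.
--     It converts text with embedded newlines and paragraph breaks into flowing text that
--     YAML can format cleanly without creating visual blank lines.
--
--     - Converts \\n indicators to actual line breaks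
--     - Joins paragraphs separated by double newlines into flowing text
--     - Eliminates single newlines within paragraphs that would break YAML flow
--     - Creates clean text optimized for YAML folded style (>) formatting
--
--     Args:
--         text: Input text that may contain \\n indicators and paragraph breaks
--         max_line_width: Maximum width for line wrapping (passed to YAML, not used here)
--
--     Returns:
--         Cleaned and formatted text optimized for YAML folded style (>) without blank lines
--     """
--     if not isinstance(text, str):
--         return text
--
--     # Step 1: Convert literal \n to actual newlines
--     text = text.replace('\\n', '\n')
--
--     # Step 2: For YAML folded style optimization, join paragraphs into flowing text
--     # This eliminates double newlines that cause issues in YAML folded style output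
--     sentences = []
--     paragraphs = text.split('\n\n')
--
--     for paragraph in paragraphs:
--         if not paragraph.strip():
--             continue
--
--         # Clean and join lines within the paragraph
--         lines = paragraph.split('\n')
--         clean_lines = []
--
--         for line in lines:
--             line = line.strip()
--             if line:
--                 clean_lines.append(line)
--
--         if clean_lines:
--             sentences.append(' '.join(clean_lines))
--
--     # Join all sentences into a single flowing text
--     # Let YAML handle the line wrapping based on the width parameter
--     result = ' '.join(sentences)
--
--     # Remove trailing whitespace
--     result = result.rstrip()
--
--     return result
-- ===== SOURCE B (Python) =====
-- DEFAULT_LINE_WIDTH = 80  # Default maximum column width for YAML text formatting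
--
--
-- def preprocess_text_for_yaml(text, max_line_width=DEFAULT_LINE_WIDTH):
--     """Flatten text for YAML folded style in one pass: split on single
--     newlines, strip each fragment, and join the non-empty ones with spaces."""
--     if not isinstance(text, str):
--         return text
--     parts = [line.strip() for line in text.replace('\\n', '\n').split('\n')]
--     return ' '.join(p for p in parts if p)
-- ===== Notes on version B (the rewrite author's own statement) =====
-- stated objective: simpler
-- what changed: The nested two-level loop (split into paragraphs on '\n\n', then per paragraph split into lines, strip, collect, join, collect, join, rstrip) collapses into one flat pass: split the whole text on single '\n', strip each fragment, and join the non-empty ones with single spaces; the trailing rstrip disappears because the result can never end in whitespace.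
import Mathlib
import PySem

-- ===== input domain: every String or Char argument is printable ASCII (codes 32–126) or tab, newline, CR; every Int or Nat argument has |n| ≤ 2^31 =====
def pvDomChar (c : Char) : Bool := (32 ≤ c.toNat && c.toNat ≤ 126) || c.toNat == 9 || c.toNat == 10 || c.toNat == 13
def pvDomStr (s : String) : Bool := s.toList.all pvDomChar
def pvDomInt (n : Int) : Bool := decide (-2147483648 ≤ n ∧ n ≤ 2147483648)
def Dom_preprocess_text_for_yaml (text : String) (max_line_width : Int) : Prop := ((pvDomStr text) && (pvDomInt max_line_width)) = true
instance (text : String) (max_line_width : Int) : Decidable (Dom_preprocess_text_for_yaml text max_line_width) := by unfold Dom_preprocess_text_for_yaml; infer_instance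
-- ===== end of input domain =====

-- B replaces A's nested two-level loop (split on "\n\n", then per paragraph split
-- on "\n", strip, collect, join, collect, join, rstrip) by one flat pass:
-- split on "\n", strip each fragment, join the non-empty ones (objective: simpler).

-- ===== PORT A =====
def preprocess_text_for_yaml (text : String) (max_line_width : Int) : String :=
  -- text = text.replace('\\n', '\n')
  let t : List Char := PySem.Chars.replace text.toList ['\\', 'n'] ['\n']
  -- paragraphs = text.split('\n\n')
  let paragraphs := PySem.Chars.splitOn t ['\n', '\n']
  -- for paragraph in paragraphs: …
  let sentences := paragraphs.foldl (fun sentences paragraph =>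
    if PySem.Chars.strip paragraph = [] then sentences
    else
      let lines := PySem.Chars.splitOn paragraph ['\n']
      let clean_lines := lines.foldl (fun clean_lines line =>
        let line := PySem.Chars.strip line
        if line ≠ [] then clean_lines ++ [line] else clean_lines) []
      if clean_lines ≠ [] then sentences ++ [PySem.Chars.join [' '] clean_lines]
      else sentences) []
  -- result = ' '.join(sentences); result = result.rstrip()
  let result := PySem.Chars.join [' '] sentences
  String.ofList (PySem.Chars.rstrip result)

-- ===== PORT B =====
def preprocess_text_for_yaml_alt (text : String) (max_line_width : Int) : String :=
  -- parts = [line.strip() for line in text.replace('\\n', '\n').split('\n')]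
  let parts := (PySem.Chars.splitOn
      (PySem.Chars.replace text.toList ['\\', 'n'] ['\n']) ['\n']).map PySem.Chars.strip
  -- return ' '.join(p for p in parts if p)
  String.ofList (PySem.Chars.join [' '] (parts.filter (· ≠ [])))

-- ===== PRECONDITION & SPEC =====
def Spec_preprocess_text_for_yaml (text : String) (max_line_width : Int) (out : String) : Prop := out = preprocess_text_for_yaml_alt text max_line_width
instance (text : String) (max_line_width : Int) (out : String) : Decidable (Spec_preprocess_text_for_yaml text max_line_width out) := by unfold Spec_preprocess_text_for_yaml; infer_instance

-- ===== CLAIM (what is proved, stated in full; the proofs are below) =====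
def Claim_equal_preprocess_text_for_yaml : Prop := ∀ (text : String) (max_line_width : Int), Dom_preprocess_text_for_yaml text max_line_width → Spec_preprocess_text_for_yaml text max_line_width (preprocess_text_for_yaml text max_line_width)

-- ===== LEMMAS AND PROOFS =====

-- Fuel-free reformulation of PySem.Chars.splitOn (for a non-empty separator).
def pvSplit (sep : List Char) : List Char → List (List Char)
  | [] => [[]]
  | c :: rest =>
    if sep.isPrefixOf (c :: rest) then [] :: pvSplit sep (rest.drop (sep.length - 1))
    else (pvSplit sep rest).modifyHead (c :: ·)
termination_by l => l.length
decreasing_by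
  · simp only [List.length_drop, List.length_cons]; omega
  · simp only [List.length_cons]; omega

theorem pvSplit_ne_nil (sep s : List Char) : pvSplit sep s ≠ [] := by
  cases s with
  | nil => simp [pvSplit]
  | cons c rest =>
    rw [pvSplit]
    split
    · simp
    · have := pvSplit_ne_nil sep rest
      cases h : pvSplit sep rest <;> simp_all
termination_by s.length
decreasing_by simp only [List.length_cons]; omega

theorem pvGo_eq (sep : List Char) (hsep : sep ≠ []) :
    ∀ (fuel : Nat) (l cur : List Char) (acc : List (List Char)), l.length ≤ fuel →
    PySem.Chars.splitOn.go sep fuel l cur acc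
      = acc.reverse ++ (pvSplit sep l).modifyHead (cur.reverse ++ ·) := by
  intro fuel
  induction fuel with
  | zero =>
    intro l cur acc hl
    have hl0 : l = [] := by cases l <;> simp_all
    subst hl0
    rw [pvSplit, PySem.Chars.splitOn.go]
    simp
  | succ fuel ih =>
    intro l cur acc hl
    cases l with
    | nil =>
      rw [pvSplit]
      have hstep : PySem.Chars.splitOn.go sep (fuel+1) [] cur acc
          = (cur.reverse :: acc).reverse := by
        rw [PySem.Chars.splitOn.go]
        omega
      rw [hstep]; simp
    | cons c rest =>
      by_cases hp : sep.isPrefixOf (c :: rest) = true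
      · have hstep : PySem.Chars.splitOn.go sep (fuel+1) (c :: rest) cur acc
            = PySem.Chars.splitOn.go sep fuel (List.drop sep.length (c :: rest)) []
                (cur.reverse :: acc) := by
          rw [PySem.Chars.splitOn.go]; simp [hp]
        have hlen : (List.drop sep.length (c :: rest)).length ≤ fuel := by
          have h1 : 1 ≤ sep.length := by cases sep with
            | nil => exact absurd rfl hsep
            | cons a sep' => simp
          simp only [List.length_drop, List.length_cons] at *
          omega
        have hd : List.drop sep.length (c :: rest) = rest.drop (sep.length - 1) := by
          cases sep with
          | nil => exact absurd rfl hsep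
          | cons a sep' => simp [List.drop_succ_cons]
        rw [hstep, ih _ _ _ hlen, pvSplit, if_pos hp, hd]
        cases hq : pvSplit sep (List.drop (sep.length - 1) rest) with
        | nil => exact absurd hq (pvSplit_ne_nil _ _)
        | cons q qs => simp
      · have hstep : PySem.Chars.splitOn.go sep (fuel+1) (c :: rest) cur acc
            = PySem.Chars.splitOn.go sep fuel rest (c :: cur) acc := by
          rw [PySem.Chars.splitOn.go]; simp [hp]
        have hlen : rest.length ≤ fuel := by
          simp only [List.length_cons] at hl; omega
        rw [hstep, ih _ _ _ hlen, pvSplit, if_neg hp]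
        cases h : pvSplit sep rest with
        | nil => exact absurd h (pvSplit_ne_nil sep rest)
        | cons q qs => simp

theorem pvSplitOn_eq (s sep : List Char) (hsep : sep ≠ []) :
    PySem.Chars.splitOn s sep = pvSplit sep s := by
  have h1 : PySem.Chars.splitOn s sep
      = PySem.Chars.splitOn.go sep (s.length + 1) s [] [] := rfl
  rw [h1, pvGo_eq sep hsep _ _ _ _ (by omega)]
  cases h : pvSplit sep s with
  | nil => exact absurd h (pvSplit_ne_nil sep s)
  | cons q qs => simp

-- unfolding equations of pvSplit for the two separators in play
theorem pvSplit1_nil : pvSplit ['\n'] [] = [[]] := by rw [pvSplit]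

theorem pvSplit1_cons_nl (r : List Char) :
    pvSplit ['\n'] ('\n' :: r) = [] :: pvSplit ['\n'] r := by
  rw [pvSplit]; simp [List.isPrefixOf]

theorem pvSplit1_cons_ne (d : Char) (r : List Char) (h : d ≠ '\n') :
    pvSplit ['\n'] (d :: r) = (pvSplit ['\n'] r).modifyHead (d :: ·) := by
  rw [pvSplit]; simp [List.isPrefixOf, Ne.symm h]

theorem pvSplit2_nil : pvSplit ['\n', '\n'] [] = [[]] := by rw [pvSplit]

theorem pvSplit2_cons2 (r : List Char) :
    pvSplit ['\n', '\n'] ('\n' :: '\n' :: r) = [] :: pvSplit ['\n', '\n'] r := by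
  rw [pvSplit]; simp [List.isPrefixOf]

theorem pvSplit2_single : pvSplit ['\n', '\n'] ['\n'] = [['\n']] := by
  rw [pvSplit]; simp [List.isPrefixOf, pvSplit2_nil]

theorem pvSplit2_nl_cons_ne (d : Char) (r : List Char) (h : d ≠ '\n') :
    pvSplit ['\n', '\n'] ('\n' :: d :: r)
      = (pvSplit ['\n', '\n'] (d :: r)).modifyHead ('\n' :: ·) := by
  rw [pvSplit]; simp [List.isPrefixOf, Ne.symm h]

theorem pvSplit2_cons_ne (d : Char) (r : List Char) (h : d ≠ '\n') :
    pvSplit ['\n', '\n'] (d :: r) = (pvSplit ['\n', '\n'] r).modifyHead (d :: ·) := by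
  rw [pvSplit]; simp [List.isPrefixOf, Ne.symm h]

theorem pvModifyHead_append {α : Type} (f : α → α) (l t : List α) (h : l ≠ []) :
    (l ++ t).modifyHead f = l.modifyHead f ++ t := by
  cases l with
  | nil => exact absurd rfl h
  | cons a l' => simp

-- the key structural fact: splitting on "\n" refines splitting on "\n\n"
theorem pvJ (s : List Char) :
    pvSplit ['\n'] s
      = (List.intersperse [[]] ((pvSplit ['\n', '\n'] s).map (pvSplit ['\n']))).flatten := by
  cases s with
  | nil => simp [pvSplit1_nil, pvSplit2_nil]
  | cons c rest =>
    by_cases hc : c = '\n'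
    · subst hc
      cases rest with
      | nil =>
        rw [pvSplit2_single]
        simp [pvSplit1_cons_nl, pvSplit1_nil]
      | cons d t =>
        by_cases hd : d = '\n'
        · subst hd
          rw [pvSplit2_cons2, pvSplit1_cons_nl, pvSplit1_cons_nl, pvJ t]
          cases h2 : pvSplit ['\n', '\n'] t with
          | nil => exact absurd h2 (pvSplit_ne_nil _ _)
          | cons p ps =>
            simp [pvSplit1_nil, List.intersperse_cons₂]
        · rw [pvSplit2_nl_cons_ne d t hd, pvSplit1_cons_nl, pvJ (d :: t)]
          cases h2 : pvSplit ['\n', '\n'] (d :: t) with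
          | nil => exact absurd h2 (pvSplit_ne_nil _ _)
          | cons p ps =>
            cases ps with
            | nil => simp [pvSplit1_cons_nl]
            | cons p2 ps2 => simp [pvSplit1_cons_nl, List.intersperse_cons₂]
    · rw [pvSplit1_cons_ne c rest hc, pvSplit2_cons_ne c rest hc, pvJ rest]
      cases h2 : pvSplit ['\n', '\n'] rest with
      | nil => exact absurd h2 (pvSplit_ne_nil _ _)
      | cons p ps =>
        have h1 := pvSplit1_cons_ne c p hc
        cases ps with
        | nil => simp [h1]
        | cons p2 ps2 =>
          simp only [List.map_cons, List.intersperse_cons₂, List.flatten_cons,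
            List.modifyHead_cons, h1]
          rw [pvModifyHead_append _ _ _ (pvSplit_ne_nil _ _)]
termination_by s.length
decreasing_by all_goals (simp only [List.length_cons]; omega)

def pvClean (L : List (List Char)) : List (List Char) :=
  (L.map PySem.Chars.strip).filter (· ≠ [])

theorem pvStrip_nil : PySem.Chars.strip [] = [] := rfl

theorem pvClean_flatten (M : List (List (List Char))) :
    pvClean (List.intersperse [[]] M).flatten = (M.map pvClean).flatten := by
  induction M with
  | nil => simp [pvClean]
  | cons x M ih =>
    cases M with
    | nil => simp [pvClean]
    | cons m M' =>
      have key : ∀ (a F : List (List Char)),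
          pvClean (a ++ [] :: F) = pvClean a ++ pvClean F := by
        intro a F
        simp [pvClean, pvStrip_nil]
      rw [List.intersperse_cons₂, List.flatten_cons, List.flatten_cons]
      have hshape : x ++ ([[]] ++ (List.intersperse [[]] (m :: M')).flatten)
          = x ++ [] :: (List.intersperse [[]] (m :: M')).flatten := rfl
      rw [← List.flatten_cons, List.flatten_cons, hshape, key, ih]
      simp

theorem pvAll_dropWhile {α : Type} (p : α → Bool) (l : List α) :
    (∀ x ∈ l.dropWhile p, p x) ↔ (∀ x ∈ l, p x) := by
  induction l with
  | nil => simp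
  | cons a t ih =>
    cases hpa : p a with
    | true => simp [hpa, ih]
    | false => simp [hpa]

theorem pvStrip_eq_nil_iff (s : List Char) :
    PySem.Chars.strip s = [] ↔ ∀ c ∈ s, PySem.Chars.isspace c := by
  simp only [PySem.Chars.strip, PySem.Chars.rstrip, PySem.Chars.lstrip,
    List.reverse_eq_nil_iff, List.dropWhile_eq_nil_iff, List.mem_reverse]
  exact pvAll_dropWhile _ _

theorem pvIsspace_nl : PySem.Chars.isspace '\n' = true := by decide

theorem pvSplit1_all (p : List Char) :
    (∀ l ∈ pvSplit ['\n'] p, ∀ c ∈ l, PySem.Chars.isspace c)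
      ↔ (∀ c ∈ p, PySem.Chars.isspace c) := by
  cases p with
  | nil => simp [pvSplit1_nil]
  | cons c r =>
    by_cases hc : c = '\n'
    · subst hc
      rw [pvSplit1_cons_nl]
      have ih := pvSplit1_all r
      simp only [List.mem_cons, forall_eq_or_imp, List.not_mem_nil, false_implies,
        implies_true, true_and, pvIsspace_nl]
      rw [ih]
    · rw [pvSplit1_cons_ne c r hc]
      have ih := pvSplit1_all r
      cases h : pvSplit ['\n'] r with
      | nil => exact absurd h (pvSplit_ne_nil _ _)
      | cons q qs =>
        rw [h] at ih
        simp only [List.modifyHead_cons, List.mem_cons, forall_eq_or_imp] at ih ⊢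
        constructor
        · rintro ⟨⟨hcs, hq⟩, hqs⟩
          exact ⟨hcs, ih.mp ⟨hq, hqs⟩⟩
        · rintro ⟨hcs, hr⟩
          obtain ⟨hq, hqs⟩ := ih.mpr hr
          exact ⟨⟨hcs, hq⟩, hqs⟩
termination_by p.length
decreasing_by all_goals (simp only [List.length_cons]; omega)

theorem pvClean_eq_nil_iff (p : List Char) :
    pvClean (pvSplit ['\n'] p) = [] ↔ PySem.Chars.strip p = [] := by
  rw [pvStrip_eq_nil_iff, ← pvSplit1_all]
  simp only [pvClean, List.filter_eq_nil_iff, List.mem_map]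
  constructor
  · intro h l hl
    have := h (PySem.Chars.strip l) ⟨l, hl, rfl⟩
    have hnil : PySem.Chars.strip l = [] := by simpa using this
    exact (pvStrip_eq_nil_iff l).mp hnil
  · rintro h a ⟨l, hl, rfl⟩
    have hnil : PySem.Chars.strip l = [] := (pvStrip_eq_nil_iff l).mpr (h l hl)
    simp [hnil]

theorem pvFoldl_clean (lines : List (List Char)) (acc : List (List Char)) :
    lines.foldl (fun cl l =>
        if PySem.Chars.strip l ≠ [] then cl ++ [PySem.Chars.strip l] else cl) acc
      = acc ++ pvClean lines := by
  induction lines generalizing acc with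
  | nil => simp [pvClean]
  | cons l ls ih =>
    simp only [List.foldl_cons]
    by_cases h : PySem.Chars.strip l = []
    · rw [if_neg (by simp [h]), ih]
      simp [pvClean, h]
    · rw [if_pos h, ih]
      simp [pvClean, h]

theorem pvFoldl_sentences (paragraphs : List (List Char)) (acc : List (List Char)) :
    paragraphs.foldl (fun sentences p =>
        if pvClean (pvSplit ['\n'] p) ≠ []
        then sentences ++ [PySem.Chars.join [' '] (pvClean (pvSplit ['\n'] p))]
        else sentences) acc
      = acc ++ ((paragraphs.map (fun p => pvClean (pvSplit ['\n'] p))).filter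
          (· ≠ [])).map (PySem.Chars.join [' ']) := by
  induction paragraphs generalizing acc with
  | nil => simp
  | cons p ps ih =>
    simp only [List.foldl_cons]
    by_cases h : pvClean (pvSplit ['\n'] p) = []
    · rw [if_neg (by simp [h]), ih]
      simp [h]
    · rw [if_pos h, ih]
      simp [h]

theorem pvJoin_cons (sep a : List Char) (M : List (List Char)) :
    PySem.Chars.join sep (a :: M)
      = if M = [] then a else a ++ sep ++ PySem.Chars.join sep M := by
  cases M with
  | nil => simp [PySem.Chars.join_singleton]
  | cons b M' => simp [PySem.Chars.join_cons_cons]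

theorem pvJoin_app (sep : List Char) (g m : List (List Char)) :
    PySem.Chars.join sep (g ++ m)
      = if g = [] then PySem.Chars.join sep m
        else if m = [] then PySem.Chars.join sep g
        else PySem.Chars.join sep g ++ sep ++ PySem.Chars.join sep m := by
  induction g with
  | nil => simp
  | cons a g' ih =>
    cases m with
    | nil => simp
    | cons b m' =>
      have hgm : g' ++ b :: m' ≠ [] := by simp
      rw [List.cons_append, pvJoin_cons sep a (g' ++ b :: m'), if_neg hgm,
        ih, pvJoin_cons sep a g']
      by_cases hg' : g' = ([] : List (List Char))
      · simp [hg']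
      · simp [hg', List.append_assoc]

theorem pvJoinJoin (sep : List Char) (L : List (List (List Char))) :
    PySem.Chars.join sep ((L.filter (· ≠ [])).map (PySem.Chars.join sep))
      = PySem.Chars.join sep L.flatten := by
  induction L with
  | nil => simp
  | cons g L' ih =>
    by_cases hg : g = ([] : List (List Char))
    · subst hg; simpa using ih
    · have hfil : (g :: L').filter (· ≠ []) = g :: L'.filter (· ≠ []) := by
        simp [hg]
      rw [hfil, List.map_cons, pvJoin_cons, List.flatten_cons, pvJoin_app, if_neg hg]
      have hEq : ((L'.filter (· ≠ [])).map (PySem.Chars.join sep) = [])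
          ↔ (L'.flatten = []) := by
        simp [List.filter_eq_nil_iff, List.flatten_eq_nil_iff]
      by_cases hf : L'.flatten = []
      · rw [if_pos (hEq.mpr hf), if_pos hf]
      · rw [if_neg (fun hx => hf (hEq.mp hx)), if_neg hf, ih]

theorem pvHead?_dropWhile {α : Type} (p : α → Bool) (l : List α) (c : α)
    (h : (l.dropWhile p).head? = some c) : p c = false := by
  induction l with
  | nil => simp at h
  | cons a t ih =>
    cases hpa : p a with
    | true => rw [List.dropWhile_cons, if_pos (by simp [hpa])] at h; exact ih h
    | false =>
      rw [List.dropWhile_cons, if_neg (by simp [hpa])] at h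
      simp only [List.head?_cons, Option.some.injEq] at h
      rwa [← h]

theorem pvRstrip_getLast? (s : List Char) (c : Char)
    (h : (PySem.Chars.rstrip s).getLast? = some c) : PySem.Chars.isspace c = false := by
  rw [PySem.Chars.rstrip, List.getLast?_reverse] at h
  exact pvHead?_dropWhile _ _ _ h

theorem pvStrip_getLast? (s : List Char) (c : Char)
    (h : (PySem.Chars.strip s).getLast? = some c) : PySem.Chars.isspace c = false := by
  rw [PySem.Chars.strip] at h
  exact pvRstrip_getLast? _ _ h

theorem pvRstrip_eq_self (s : List Char)
    (h : ∀ c, s.getLast? = some c → PySem.Chars.isspace c = false) :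
    PySem.Chars.rstrip s = s := by
  rw [PySem.Chars.rstrip]
  cases hrv : s.reverse with
  | nil =>
    have : s = [] := by simpa using congrArg List.reverse hrv
    simp [this]
  | cons b u =>
    have hb : PySem.Chars.isspace b = false := by
      apply h
      rw [← List.head?_reverse, hrv, List.head?_cons]
    have hdw : List.dropWhile PySem.Chars.isspace (b :: u) = b :: u := by
      rw [List.dropWhile_cons, if_neg (by simp [hb])]
    rw [hdw, ← hrv, List.reverse_reverse]

theorem pvJoin_ne_nil (sep b : List Char) (M : List (List Char)) (hb : b ≠ []) :
    PySem.Chars.join sep (b :: M) ≠ [] := by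
  cases M with
  | nil => simpa [PySem.Chars.join_singleton] using hb
  | cons m M' =>
    rw [PySem.Chars.join_cons_cons]
    simp [hb]

theorem pvJoin_getLast? (CL : List (List Char))
    (hall : ∀ l ∈ CL, l ≠ [] ∧ ∀ c, l.getLast? = some c → PySem.Chars.isspace c = false) :
    ∀ c, (PySem.Chars.join [' '] CL).getLast? = some c → PySem.Chars.isspace c = false := by
  induction CL with
  | nil => intro c hc; simp [PySem.Chars.join_nil] at hc
  | cons a M ih =>
    intro c hc
    cases M with
    | nil =>
      rw [PySem.Chars.join_singleton] at hc
      exact (hall a (by simp)).2 c hc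
    | cons b M' =>
      have hbne : b ≠ [] := (hall b (by simp)).1
      have hjne : PySem.Chars.join [' '] (b :: M') ≠ [] := pvJoin_ne_nil _ _ _ hbne
      rw [PySem.Chars.join_cons_cons, List.append_assoc,
        List.getLast?_append_of_ne_nil _ (by simp),
        List.getLast?_append_of_ne_nil _ hjne] at hc
      exact ih (fun l hl => hall l (by simp [hl])) c hc

-- ===== VERDICT (by name: the statement is the Claim_ definition above) =====
theorem preprocess_text_for_yaml_spec : Claim_equal_preprocess_text_for_yaml := by
  intro text mlw _
  unfold Spec_preprocess_text_for_yaml preprocess_text_for_yaml preprocess_text_for_yaml_alt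
  have e1 : ∀ s : List Char, PySem.Chars.splitOn s ['\n'] = pvSplit ['\n'] s :=
    fun s => pvSplitOn_eq s ['\n'] (by simp)
  have e2 : ∀ s : List Char, PySem.Chars.splitOn s ['\n', '\n'] = pvSplit ['\n', '\n'] s :=
    fun s => pvSplitOn_eq s ['\n', '\n'] (by simp)
  simp only [e1, e2, pvFoldl_clean, List.nil_append]
  have hstep : ∀ (acc : List (List Char)) (p : List Char),
      (if PySem.Chars.strip p = [] then acc
       else if pvClean (pvSplit ['\n'] p) ≠ []
            then acc ++ [PySem.Chars.join [' '] (pvClean (pvSplit ['\n'] p))]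
            else acc)
      = (if pvClean (pvSplit ['\n'] p) ≠ []
         then acc ++ [PySem.Chars.join [' '] (pvClean (pvSplit ['\n'] p))]
         else acc) := by
    intro acc p
    by_cases h : PySem.Chars.strip p = []
    · rw [if_pos h, if_neg (by simp [pvClean_eq_nil_iff, h])]
    · rw [if_neg h]
  simp only [hstep]
  rw [pvFoldl_sentences _ [], List.nil_append, pvJoinJoin]
  set t := PySem.Chars.replace text.toList ['\\', 'n'] ['\n'] with ht
  have hflat : ((pvSplit ['\n', '\n'] t).map (fun p => pvClean (pvSplit ['\n'] p))).flatten
      = pvClean (pvSplit ['\n'] t) := by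
    conv_rhs => rw [pvJ t]
    rw [pvClean_flatten, List.map_map]
    rfl
  rw [hflat]
  have hclean : (List.map PySem.Chars.strip (pvSplit ['\n'] t)).filter (· ≠ [])
      = pvClean (pvSplit ['\n'] t) := rfl
  rw [hclean]
  have hrs : PySem.Chars.rstrip (PySem.Chars.join [' '] (pvClean (pvSplit ['\n'] t)))
      = PySem.Chars.join [' '] (pvClean (pvSplit ['\n'] t)) := by
    apply pvRstrip_eq_self
    apply pvJoin_getLast?
    intro l hl
    simp only [pvClean, List.mem_filter, List.mem_map] at hl
    obtain ⟨⟨x, _, hx⟩, hne⟩ := hl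
    refine ⟨by simpa using hne, ?_⟩
    intro c hc
    exact pvStrip_getLast? x c (hx ▸ hc)
  rw [hrs]
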